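-- pv_equiv track=rewrite | github.com/shz545/MIXER | csd.py | csd_nonzero_digits
-- ===== SOURCE A (Python) =====
-- def csd_nonzero_digits(n: int) -> int:
--     """
--     回傳整數 n 的 Canonical Signed Digit（CSD）表示中，非零位元的數量。
--     這個數字可用來衡量硬體實現時的加法/減法資源消耗。
--     參考演算法：對 n 取尾數 mod4 來決定 ±1 消元，直至 n 變 0。
--     """
--     count = 0
--     x = n
--     while x != 0:
--         if x & 1 == 0:
--             x //= 2
--         else:
--             # u = 2 - (x mod 4) 可取 +1 或 -1
--             m4 = x & 3
--             u = 1 if m4 == 1 else -1  # m4 == 3 時走 -1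
--             x -= u
--             count += 1
--             x //= 2
--     return count
-- ===== SOURCE B (Python) =====
-- def csd_nonzero_digits(n: int) -> int:
--     # Closed form: the number of nonzero digits in the CSD (NAF) representation
--     # of n equals the popcount of (3*n) ^ n, which is nonnegative because 3*n
--     # and n always share their sign.
--     return ((3 * n) ^ n).bit_count()
-- ===== Notes on version B (the rewrite author's own statement) =====
-- stated objective: idiomatic
-- what changed: Replaces the digit-by-digit CSD elimination loop with the closed-form bit identity: the nonzero-CSD-digit count of n is the popcount of (3*n) ^ n, a single arithmetic expression with no loop.
import Mathlib
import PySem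

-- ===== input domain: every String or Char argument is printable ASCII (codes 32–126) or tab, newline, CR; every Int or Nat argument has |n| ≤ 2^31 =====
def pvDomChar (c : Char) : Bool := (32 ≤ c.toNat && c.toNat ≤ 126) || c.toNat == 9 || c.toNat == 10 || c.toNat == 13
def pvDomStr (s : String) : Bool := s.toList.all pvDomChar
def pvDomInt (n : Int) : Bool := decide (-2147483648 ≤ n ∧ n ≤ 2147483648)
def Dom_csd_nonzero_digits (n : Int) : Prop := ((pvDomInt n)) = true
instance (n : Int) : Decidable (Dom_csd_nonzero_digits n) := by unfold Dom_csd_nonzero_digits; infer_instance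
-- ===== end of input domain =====

-- B replaces A's digit-by-digit CSD elimination loop by the closed-form identity
-- "nonzero CSD digits of n = popcount((3*n) ^ n)" (idiomatic one-liner).


-- ===== PORT A =====
-- helper facts for the loop's termination, cited by name in decreasing_by
-- (kept as small explicit proof terms on purpose)
theorem pvNatAndThree (m : Nat) : m &&& 3 = m % 4 := Nat.and_two_pow_sub_one_eq_mod m 2
theorem pvBandOneEmod (x : Int) : PySem.Int.band x 1 = x % 2 := by
  rw [PySem.Int.band_one]
  unfold PySem.Int.mod
  rw [Int.fmod_eq_emod, if_pos (Or.inl (by decide : (0:Int) ≤ 2))]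
  exact add_zero _
theorem pvNegModFour (m : Nat) : ((3 - m % 4 : Nat) : Int) = (-(m:Int) - 1) % 4 := by
  have hr4 : m % 4 < 4 := Nat.mod_lt _ (by decide)
  have hc : (m:Int) = 4 * ((m / 4 : Nat) : Int) + ((m % 4 : Nat) : Int) := by
    exact_mod_cast (Nat.div_add_mod m 4).symm
  have hsub : ((3 - m % 4 : Nat) : Int) = 3 - ((m % 4 : Nat) : Int) :=
    Nat.cast_sub (Nat.lt_succ_iff.mp hr4)
  rw [hsub, hc]
  rw [show (-(4 * ((m / 4 : Nat) : Int) + ((m % 4 : Nat) : Int)) - 1)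
        = (3 - ((m % 4 : Nat) : Int)) + 4 * (-((m / 4 : Nat) : Int) - 1) from by ring,
      Int.add_mul_emod_self_left]
  refine (Int.emod_eq_of_lt ?_ ?_).symm
  · have h3 : ((m % 4 : Nat) : Int) ≤ 3 := by exact_mod_cast Nat.lt_succ_iff.mp hr4
    exact sub_nonneg.mpr h3
  · exact lt_of_le_of_lt (sub_le_self 3 (Int.natCast_nonneg _)) (by decide)
theorem pvBandThreeEmod (x : Int) : PySem.Int.band x 3 = x % 4 := by
  unfold PySem.Int.band
  by_cases h1 : 0 ≤ x
  · rw [if_pos h1, if_pos (by decide : (0:Int) ≤ 3), show (3:Int).toNat = 3 from rfl,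
        pvNatAndThree, Int.natCast_mod, Int.toNat_of_nonneg h1]
    rfl
  · rw [if_neg h1, if_pos (by decide : (0:Int) ≤ 3), show (3:Int).toNat = 3 from rfl,
        Nat.and_comm, pvNatAndThree, pvNegModFour,
        Int.toNat_of_nonneg (by rw [show (-x - 1 : Int) = -(x + 1) from by ring]; exact neg_nonneg.mpr (Int.lt_iff_add_one_le.mp (Int.not_le.mp h1))),
        show -(-x - 1) - 1 = x from by ring]
theorem pvDecEven (x : Int) (h0 : ¬ x = 0) (h1 : PySem.Int.band x 1 = 0) :
    (PySem.Int.floordiv x 2).natAbs < x.natAbs := by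
  obtain ⟨q, rfl⟩ : (2:Int) ∣ x := Int.dvd_of_emod_eq_zero ((pvBandOneEmod x) ▸ h1)
  rw [PySem.Int.floordiv_eq_ediv_of_pos (by decide : (0:Int) < 2),
      Int.mul_ediv_cancel_left q (by decide : (2:Int) ≠ 0),
      Int.natAbs_mul, show (2:Int).natAbs = 2 from rfl, two_mul]
  exact Nat.lt_add_of_pos_left (Int.natAbs_pos.mpr (fun h => h0 (by rw [h, mul_zero])))
theorem pvAbs41 (k : Int) : (2*k).natAbs < (4*k + 1).natAbs := by
  rcases Int.lt_or_le k 0 with hk | hk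
  · have hk1 : k + 1 ≤ 0 := Int.lt_iff_add_one_le.mp hk
    have h2 : 2*(k + 1) ≤ 0 := mul_nonpos_iff.mpr (Or.inl ⟨by decide, hk1⟩)
    rw [← Int.natAbs_neg (2*k), ← Int.natAbs_neg (4*k + 1)]
    refine Int.natAbs_lt_natAbs_of_nonneg_of_lt ?_ (neg_lt_neg (Int.lt_iff_add_one_le.mpr ?_))
    · exact neg_nonneg.mpr (mul_nonpos_iff.mpr (Or.inl ⟨by decide, le_of_lt hk⟩))
    · calc 4*k + 1 + 1 = 2*k + 2*(k + 1) := by ring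
        _ ≤ 2*k + 0 := add_le_add_right h2 _
        _ = 2*k := add_zero _
  · refine Int.natAbs_lt_natAbs_of_nonneg_of_lt (mul_nonneg (by decide) hk) ?_
    calc 2*k ≤ 4*k := mul_le_mul_of_nonneg_right (by decide : (2:Int) ≤ 4) hk
      _ < 4*k + 1 := lt_add_one _
theorem pvAbs43 (k : Int) : (2*(k + 1)).natAbs < (4*k + 3).natAbs := by
  rcases Int.lt_or_le k 0 with hk | hk
  · have hk1 : k + 1 ≤ 0 := Int.lt_iff_add_one_le.mp hk
    have h2 : 2*(k + 1) ≤ 0 := mul_nonpos_iff.mpr (Or.inl ⟨by decide, hk1⟩)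
    rw [← Int.natAbs_neg (2*(k + 1)), ← Int.natAbs_neg (4*k + 3)]
    refine Int.natAbs_lt_natAbs_of_nonneg_of_lt (neg_nonneg.mpr h2) (neg_lt_neg (Int.lt_iff_add_one_le.mpr ?_))
    calc 4*k + 3 + 1 = 2*(k + 1) + 2*(k + 1) := by ring
      _ ≤ 2*(k + 1) + 0 := add_le_add_right h2 _
      _ = 2*(k + 1) := add_zero _
  · refine Int.natAbs_lt_natAbs_of_nonneg_of_lt (mul_nonneg (by decide) (add_nonneg hk (by decide))) ?_
    calc 2*(k + 1) = 2*k + 2 := by ring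
      _ ≤ 4*k + 2 := add_le_add_left (mul_le_mul_of_nonneg_right (by decide : (2:Int) ≤ 4) hk) 2
      _ < 4*k + 3 := add_lt_add_right (by decide : (2:Int) < 3) _
theorem pvIntFour (r : Int) (h0 : 0 ≤ r) (h4 : r < 4) : r = 0 ∨ r = 1 ∨ r = 2 ∨ r = 3 := by
  obtain ⟨m, rfl⟩ := Int.eq_ofNat_of_zero_le h0
  have hm : m < 4 := by exact_mod_cast h4
  rcases m with _ | _ | _ | _ | m
  · exact Or.inl rfl
  · exact Or.inr (Or.inl rfl)
  · exact Or.inr (Or.inr (Or.inl rfl))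
  · exact Or.inr (Or.inr (Or.inr rfl))
  · exact absurd hm (Nat.not_lt.mpr (Nat.le_add_left 4 m))

theorem pvModFourOfOdd (x : Int) (h2 : x % 2 ≠ 0) (h4 : x % 4 ≠ 1) : x % 4 = 3 := by
  have e : x % 4 % 2 = x % 2 := Int.emod_emod_of_dvd x (by decide)
  have h04 : 0 ≤ x % 4 := Int.emod_nonneg x (by decide)
  have h44 : x % 4 < 4 := Int.emod_lt_of_pos x (by decide)
  rcases pvIntFour (x % 4) h04 h44 with h | h | h | h
  · exact absurd (by rw [← e, h]; decide) h2
  · exact absurd h h4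
  · exact absurd (by rw [← e, h]; decide) h2
  · exact h
theorem pvDecOdd (x : Int) (h1 : ¬ PySem.Int.band x 1 = 0) :
    (PySem.Int.floordiv (x - (if PySem.Int.band x 3 = 1 then (1 : Int) else -1)) 2).natAbs < x.natAbs := by
  have hm2 : x % 2 ≠ 0 := fun h => h1 (by rw [pvBandOneEmod, h])
  by_cases hm : PySem.Int.band x 3 = 1
  · have h4 : x % 4 = 1 := (pvBandThreeEmod x) ▸ hm
    have hd : (x - 1) % 4 = 0 := by rw [Int.sub_emod, h4]; decide
    obtain ⟨k, hk⟩ := Int.dvd_of_emod_eq_zero hd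
    rw [if_pos hm, PySem.Int.floordiv_eq_ediv_of_pos (by decide : (0:Int) < 2),
        show x - 1 = 2*(2*k) from by rw [hk]; ring,
        Int.mul_ediv_cancel_left _ (by decide : (2:Int) ≠ 0),
        show x = 4*k + 1 from by rw [← hk]; ring]
    exact pvAbs41 k
  · have h4 : x % 4 = 3 := pvModFourOfOdd x hm2 (fun h => hm (by rw [pvBandThreeEmod, h]))
    have hd : (x + 1) % 4 = 0 := by rw [show x + 1 = x - (-1) from by ring, Int.sub_emod, h4]; decide
    obtain ⟨k, hk⟩ := Int.dvd_of_emod_eq_zero hd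
    rw [if_neg hm, PySem.Int.floordiv_eq_ediv_of_pos (by decide : (0:Int) < 2),
        show x - (-1) = 2*(2*k) from by rw [show x - (-1) = x + 1 from by ring, hk]; ring,
        Int.mul_ediv_cancel_left _ (by decide : (2:Int) ≠ 0),
        show x = 4*(k - 1) + 3 from by rw [show (4:Int)*(k - 1) + 3 = 4*k + -1 from by ring, ← hk]; ring,
        show (2:Int)*k = 2*((k - 1) + 1) from by ring]
    exact pvAbs43 (k - 1)

-- the while-loop of A: state (x, count), one recursive call per iteration
def csdLoop (x : Int) (count : Int) : Int :=
  if x = 0 then count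
  else if PySem.Int.band x 1 = 0 then
    csdLoop (PySem.Int.floordiv x 2) count
  else
    let m4 := PySem.Int.band x 3
    let u : Int := if m4 = 1 then 1 else -1
    csdLoop (PySem.Int.floordiv (x - u) 2) (count + 1)
termination_by x.natAbs
decreasing_by
  · exact pvDecEven x (by assumption) (by assumption)
  · exact pvDecOdd x (by assumption)

def csd_nonzero_digits (n : Int) : Int := csdLoop n 0

-- ===== PORT B =====
-- (3*n) ^ n is PySem.Int.bxor, .bit_count() is PySem.Int.bitCount (Python-exact)
def csd_nonzero_digits_alt (n : Int) : Int := (PySem.Int.bitCount (PySem.Int.bxor (3 * n) n) : Int)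

-- ===== PRECONDITION & SPEC =====
def Spec_csd_nonzero_digits (n : Int) (out : Int) : Prop := out = csd_nonzero_digits_alt n
instance (n : Int) (out : Int) : Decidable (Spec_csd_nonzero_digits n out) := by unfold Spec_csd_nonzero_digits; infer_instance

-- ===== CLAIM (what is proved, stated in full; the proofs are below) =====
def Claim_equal_csd_nonzero_digits : Prop := ∀ (n : Int), Dom_csd_nonzero_digits n → Spec_csd_nonzero_digits n (csd_nonzero_digits n)

-- ===== LEMMAS AND PROOFS =====

-- Nat bit-append: xor acts bitwise on (2m + a) and (2n + b)
theorem pvNatXorApp (a b : Bool) (m n : Nat) :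
    (2*m + a.toNat) ^^^ (2*n + b.toNat) = 2*(m ^^^ n) + (a != b).toNat := by
  have h := Nat.bitwise_bit (f := bne) (by decide) a m b n
  simpa [Nat.bit_val, HXor.hXor, XorOp.xor, Nat.xor, Nat.mul_comm] using h

theorem pvN00 (m n : Nat) : (2*m) ^^^ (2*n) = 2*(m ^^^ n) := by
  have h := pvNatXorApp false false m n
  simpa using h

theorem pvN11 (m n : Nat) : (2*m + 1) ^^^ (2*n + 1) = 2*(m ^^^ n) := by
  have h := pvNatXorApp true true m n
  simpa using h

theorem pvN10 (m n : Nat) : (2*m + 1) ^^^ (2*n) = 2*(m ^^^ n) + 1 := by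
  have h := pvNatXorApp true false m n
  simpa using h

theorem pvN01 (m n : Nat) : (2*m) ^^^ (2*n + 1) = 2*(m ^^^ n) + 1 := by
  have h := pvNatXorApp false true m n
  simpa using h

theorem pvX00 (a b : Int) : PySem.Int.bxor (2*a) (2*b) = 2 * PySem.Int.bxor a b := by
  unfold PySem.Int.bxor
  by_cases ha : 0 ≤ a <;> by_cases hb : 0 ≤ b
  · rw [if_pos (show (0:Int) ≤ 2*a by omega), if_pos (show (0:Int) ≤ 2*b by omega), if_pos ha, if_pos hb]
    have e1 : (2*a).toNat = 2*a.toNat := by omega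
    have e2 : (2*b).toNat = 2*b.toNat := by omega
    rw [e1, e2]
    have h := pvN00 a.toNat b.toNat
    omega
  · rw [if_pos (show (0:Int) ≤ 2*a by omega), if_neg (show ¬ (0:Int) ≤ 2*b by omega), if_pos ha, if_neg hb]
    have e1 : (2*a).toNat = 2*a.toNat := by omega
    have e2 : (-(2*b) - 1).toNat = 2*(-b - 1).toNat + 1 := by omega
    rw [e1, e2]
    have h := pvN01 a.toNat (-b - 1).toNat
    omega
  · rw [if_neg (show ¬ (0:Int) ≤ 2*a by omega), if_pos (show (0:Int) ≤ 2*b by omega), if_neg ha, if_pos hb]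
    have e1 : (-(2*a) - 1).toNat = 2*(-a - 1).toNat + 1 := by omega
    have e2 : (2*b).toNat = 2*b.toNat := by omega
    rw [e1, e2]
    have h := pvN10 (-a - 1).toNat b.toNat
    omega
  · rw [if_neg (show ¬ (0:Int) ≤ 2*a by omega), if_neg (show ¬ (0:Int) ≤ 2*b by omega), if_neg ha, if_neg hb]
    have e1 : (-(2*a) - 1).toNat = 2*(-a - 1).toNat + 1 := by omega
    have e2 : (-(2*b) - 1).toNat = 2*(-b - 1).toNat + 1 := by omega
    rw [e1, e2]
    have h := pvN11 (-a - 1).toNat (-b - 1).toNat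
    omega

theorem pvX11 (a b : Int) : PySem.Int.bxor (2*a + 1) (2*b + 1) = 2 * PySem.Int.bxor a b := by
  unfold PySem.Int.bxor
  by_cases ha : 0 ≤ a <;> by_cases hb : 0 ≤ b
  · rw [if_pos (show (0:Int) ≤ 2*a + 1 by omega), if_pos (show (0:Int) ≤ 2*b + 1 by omega), if_pos ha, if_pos hb]
    have e1 : (2*a + 1).toNat = 2*a.toNat + 1 := by omega
    have e2 : (2*b + 1).toNat = 2*b.toNat + 1 := by omega
    rw [e1, e2]
    have h := pvN11 a.toNat b.toNat
    omega
  · rw [if_pos (show (0:Int) ≤ 2*a + 1 by omega), if_neg (show ¬ (0:Int) ≤ 2*b + 1 by omega), if_pos ha, if_neg hb]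
    have e1 : (2*a + 1).toNat = 2*a.toNat + 1 := by omega
    have e2 : (-(2*b + 1) - 1).toNat = 2*(-b - 1).toNat := by omega
    rw [e1, e2]
    have h := pvN10 a.toNat (-b - 1).toNat
    omega
  · rw [if_neg (show ¬ (0:Int) ≤ 2*a + 1 by omega), if_pos (show (0:Int) ≤ 2*b + 1 by omega), if_neg ha, if_pos hb]
    have e1 : (-(2*a + 1) - 1).toNat = 2*(-a - 1).toNat := by omega
    have e2 : (2*b + 1).toNat = 2*b.toNat + 1 := by omega
    rw [e1, e2]
    have h := pvN01 (-a - 1).toNat b.toNat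
    omega
  · rw [if_neg (show ¬ (0:Int) ≤ 2*a + 1 by omega), if_neg (show ¬ (0:Int) ≤ 2*b + 1 by omega), if_neg ha, if_neg hb]
    have e1 : (-(2*a + 1) - 1).toNat = 2*(-a - 1).toNat := by omega
    have e2 : (-(2*b + 1) - 1).toNat = 2*(-b - 1).toNat := by omega
    rw [e1, e2]
    have h := pvN00 (-a - 1).toNat (-b - 1).toNat
    omega

theorem pvX10 (a b : Int) : PySem.Int.bxor (2*a + 1) (2*b) = 2 * PySem.Int.bxor a b + 1 := by
  unfold PySem.Int.bxor
  by_cases ha : 0 ≤ a <;> by_cases hb : 0 ≤ b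
  · rw [if_pos (show (0:Int) ≤ 2*a + 1 by omega), if_pos (show (0:Int) ≤ 2*b by omega), if_pos ha, if_pos hb]
    have e1 : (2*a + 1).toNat = 2*a.toNat + 1 := by omega
    have e2 : (2*b).toNat = 2*b.toNat := by omega
    rw [e1, e2]
    have h := pvN10 a.toNat b.toNat
    omega
  · rw [if_pos (show (0:Int) ≤ 2*a + 1 by omega), if_neg (show ¬ (0:Int) ≤ 2*b by omega), if_pos ha, if_neg hb]
    have e1 : (2*a + 1).toNat = 2*a.toNat + 1 := by omega
    have e2 : (-(2*b) - 1).toNat = 2*(-b - 1).toNat + 1 := by omega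
    rw [e1, e2]
    have h := pvN11 a.toNat (-b - 1).toNat
    omega
  · rw [if_neg (show ¬ (0:Int) ≤ 2*a + 1 by omega), if_pos (show (0:Int) ≤ 2*b by omega), if_neg ha, if_pos hb]
    have e1 : (-(2*a + 1) - 1).toNat = 2*(-a - 1).toNat := by omega
    have e2 : (2*b).toNat = 2*b.toNat := by omega
    rw [e1, e2]
    have h := pvN00 (-a - 1).toNat b.toNat
    omega
  · rw [if_neg (show ¬ (0:Int) ≤ 2*a + 1 by omega), if_neg (show ¬ (0:Int) ≤ 2*b by omega), if_neg ha, if_neg hb]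
    have e1 : (-(2*a + 1) - 1).toNat = 2*(-a - 1).toNat := by omega
    have e2 : (-(2*b) - 1).toNat = 2*(-b - 1).toNat + 1 := by omega
    rw [e1, e2]
    have h := pvN01 (-a - 1).toNat (-b - 1).toNat
    omega

theorem pvX01 (a b : Int) : PySem.Int.bxor (2*a) (2*b + 1) = 2 * PySem.Int.bxor a b + 1 := by
  unfold PySem.Int.bxor
  by_cases ha : 0 ≤ a <;> by_cases hb : 0 ≤ b
  · rw [if_pos (show (0:Int) ≤ 2*a by omega), if_pos (show (0:Int) ≤ 2*b + 1 by omega), if_pos ha, if_pos hb]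
    have e1 : (2*a).toNat = 2*a.toNat := by omega
    have e2 : (2*b + 1).toNat = 2*b.toNat + 1 := by omega
    rw [e1, e2]
    have h := pvN01 a.toNat b.toNat
    omega
  · rw [if_pos (show (0:Int) ≤ 2*a by omega), if_neg (show ¬ (0:Int) ≤ 2*b + 1 by omega), if_pos ha, if_neg hb]
    have e1 : (2*a).toNat = 2*a.toNat := by omega
    have e2 : (-(2*b + 1) - 1).toNat = 2*(-b - 1).toNat := by omega
    rw [e1, e2]
    have h := pvN00 a.toNat (-b - 1).toNat
    omega
  · rw [if_neg (show ¬ (0:Int) ≤ 2*a by omega), if_pos (show (0:Int) ≤ 2*b + 1 by omega), if_neg ha, if_pos hb]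
    have e1 : (-(2*a) - 1).toNat = 2*(-a - 1).toNat + 1 := by omega
    have e2 : (2*b + 1).toNat = 2*b.toNat + 1 := by omega
    rw [e1, e2]
    have h := pvN11 (-a - 1).toNat b.toNat
    omega
  · rw [if_neg (show ¬ (0:Int) ≤ 2*a by omega), if_neg (show ¬ (0:Int) ≤ 2*b + 1 by omega), if_neg ha, if_neg hb]
    have e1 : (-(2*a) - 1).toNat = 2*(-a - 1).toNat + 1 := by omega
    have e2 : (-(2*b + 1) - 1).toNat = 2*(-b - 1).toNat := by omega
    rw [e1, e2]
    have h := pvN10 (-a - 1).toNat (-b - 1).toNat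
    omega


theorem pvBxorNonneg (a b : Int) (h : 0 ≤ a ↔ 0 ≤ b) : 0 ≤ PySem.Int.bxor a b := by
  unfold PySem.Int.bxor
  split_ifs <;> omega

theorem pvBcEven (s : Int) (hs : 0 ≤ s) : PySem.Int.bitCount (2*s) = PySem.Int.bitCount s := by
  rcases eq_or_lt_of_le hs with h0 | h0
  · rw [← h0]
    norm_num
  · rw [PySem.Int.bitCount_of_pos (by omega)]
    have hm : PySem.Int.mod (2*s) 2 = 0 := by
      unfold PySem.Int.mod
      rw [Int.fmod_eq_emod, if_pos (Or.inl (by norm_num : (0:Int) ≤ 2))]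
      omega
    have hd : PySem.Int.floordiv (2*s) 2 = s := by
      rw [PySem.Int.floordiv_eq_ediv_of_pos (by norm_num)]
      omega
    rw [hm, hd]
    norm_num

theorem pvBcOdd (s : Int) (hs : 0 ≤ s) : PySem.Int.bitCount (2*s + 1) = PySem.Int.bitCount s + 1 := by
  rw [PySem.Int.bitCount_of_pos (by omega)]
  have hm : PySem.Int.mod (2*s + 1) 2 = 1 := by
    unfold PySem.Int.mod
    rw [Int.fmod_eq_emod, if_pos (Or.inl (by norm_num : (0:Int) ≤ 2))]
    omega
  have hd : PySem.Int.floordiv (2*s + 1) 2 = s := by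
    rw [PySem.Int.floordiv_eq_ediv_of_pos (by norm_num)]
    omega
  rw [hm, hd]
  omega

-- the shift identity: (3k+2) ^ k = (3(k+1)) ^ (k+1)
theorem pvShiftId : ∀ (N : Nat) (k : Int), k.natAbs ≤ N →
    PySem.Int.bxor (3*k + 2) k = PySem.Int.bxor (3*(k+1)) (k+1) := by
  intro N
  induction N with
  | zero =>
    intro k hk
    have : k = 0 := by omega
    subst this
    decide
  | succ N ih =>
    intro k hk
    by_cases hne : k = -1
    · subst hne
      decide
    · rcases Int.even_or_odd k with ⟨j, hj⟩ | ⟨j, hj⟩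
      · -- k even: both sides are 2 * bxor (3j+1) j
        replace hj : k = 2*j := by omega
        subst hj
        rw [show (3 : Int)*(2*j) + 2 = 2*(3*j + 1) from by ring]
        rw [show (3 : Int)*(2*j + 1) = 2*(3*j + 1) + 1 from by ring]
        rw [pvX00, pvX11]
      · -- k odd: reduces to the identity at j
        subst hj
        rw [show (3 : Int)*(2*j + 1) + 2 = 2*(3*j + 2) + 1 from by ring]
        rw [show (3 : Int)*(2*j + 1 + 1) = 2*(3*(j + 1)) from by ring]
        rw [show (2 : Int)*j + 1 + 1 = 2*(j + 1) from by ring]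
        rw [pvX11, pvX00, ih j (by omega)]

-- the main loop invariant: csdLoop x c = c + popcount((3x) ^ x)
theorem pvMain : ∀ (N : Nat) (x : Int), x.natAbs ≤ N → ∀ (c : Int),
    csdLoop x c = c + (PySem.Int.bitCount (PySem.Int.bxor (3*x) x) : Int) := by
  intro N
  induction N with
  | zero =>
    intro x hx c
    have : x = 0 := by omega
    subst this
    rw [csdLoop]
    norm_num [PySem.Int.bitCount_zero]
  | succ N ih =>
    intro x hx c
    by_cases h0 : x = 0
    · subst h0
      rw [csdLoop]
      norm_num [PySem.Int.bitCount_zero]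
    · have hb1 := pvBandOneEmod x
      have hb3 := pvBandThreeEmod x
      rw [csdLoop]
      rcases (by omega : x % 4 = 0 ∨ x % 4 = 1 ∨ x % 4 = 2 ∨ x % 4 = 3) with hr | hr | hr | hr
      · -- even
        obtain ⟨y, rfl⟩ : ∃ y, x = 2*y := ⟨x / 2, by omega⟩
        have hfd : PySem.Int.floordiv (2*y) 2 = y := by
          rw [PySem.Int.floordiv_eq_ediv_of_pos (by norm_num)]
          omega
        have hcond : PySem.Int.band (2*y) 1 = 0 := by omega
        rw [if_neg h0, if_pos hcond, hfd, ih y (by omega) c]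
        rw [show (3 : Int)*(2*y) = 2*(3*y) from by ring, pvX00,
            pvBcEven _ (pvBxorNonneg _ _ (by omega))]
      · -- x = 4k+1: u = 1
        obtain ⟨k, rfl⟩ : ∃ k, x = 4*k + 1 := ⟨x / 4, by omega⟩
        have hcond : ¬ PySem.Int.band (4*k + 1) 1 = 0 := by omega
        have hm4 : PySem.Int.band (4*k + 1) 3 = 1 := by omega
        rw [if_neg h0, if_neg hcond]
        simp only [hm4, if_true]
        have hfd : PySem.Int.floordiv (4*k + 1 - 1) 2 = 2*k := by
          rw [PySem.Int.floordiv_eq_ediv_of_pos (by norm_num)]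
          omega
        rw [hfd, ih (2*k) (by omega) (c + 1)]
        have hs : 0 ≤ PySem.Int.bxor (3*k) k := pvBxorNonneg _ _ (by omega)
        rw [show (3 : Int)*(4*k + 1) = 2*(2*(3*k) + 1) + 1 from by ring,
            show (4 : Int)*k + 1 = 2*(2*k) + 1 from by ring,
            pvX11, pvX10,
            show (3 : Int)*(2*k) = 2*(3*k) from by ring, pvX00,
            pvBcEven (2*PySem.Int.bxor (3*k) k + 1) (by omega),
            pvBcOdd (PySem.Int.bxor (3*k) k) hs,
            pvBcEven (PySem.Int.bxor (3*k) k) hs]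
        push_cast
        ring
      · -- even (x % 4 = 2)
        obtain ⟨y, rfl⟩ : ∃ y, x = 2*y := ⟨x / 2, by omega⟩
        have hfd : PySem.Int.floordiv (2*y) 2 = y := by
          rw [PySem.Int.floordiv_eq_ediv_of_pos (by norm_num)]
          omega
        have hcond : PySem.Int.band (2*y) 1 = 0 := by omega
        rw [if_neg h0, if_pos hcond, hfd, ih y (by omega) c]
        rw [show (3 : Int)*(2*y) = 2*(3*y) from by ring, pvX00,
            pvBcEven _ (pvBxorNonneg _ _ (by omega))]
      · -- x = 4k+3: u = -1
        obtain ⟨k, rfl⟩ : ∃ k, x = 4*k + 3 := ⟨x / 4, by omega⟩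
        have hcond : ¬ PySem.Int.band (4*k + 3) 1 = 0 := by omega
        have hm4 : ¬ PySem.Int.band (4*k + 3) 3 = 1 := by omega
        rw [if_neg h0, if_neg hcond]
        simp only [hm4, if_false]
        have hfd : PySem.Int.floordiv (4*k + 3 - -1) 2 = 2*(k + 1) := by
          rw [PySem.Int.floordiv_eq_ediv_of_pos (by norm_num)]
          omega
        rw [hfd, ih (2*(k + 1)) (by omega) (c + 1)]
        have hs' : 0 ≤ PySem.Int.bxor (3*k + 2) k := pvBxorNonneg _ _ (by omega)
        have hs'' : 0 ≤ PySem.Int.bxor (3*(k + 1)) (k + 1) := pvBxorNonneg _ _ (by omega)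
        rw [show (3 : Int)*(4*k + 3) = 2*(2*(3*k + 2)) + 1 from by ring,
            show (4 : Int)*k + 3 = 2*(2*k + 1) + 1 from by ring,
            pvX11, pvX01,
            show (3 : Int)*(2*(k + 1)) = 2*(3*(k + 1)) from by ring, pvX00,
            pvBcEven (2*PySem.Int.bxor (3*k + 2) k + 1) (by omega),
            pvBcOdd (PySem.Int.bxor (3*k + 2) k) hs',
            pvBcEven (PySem.Int.bxor (3*(k + 1)) (k + 1)) hs'',
            pvShiftId k.natAbs k (le_refl _)]
        push_cast
        ring

-- ===== VERDICT (by name: the statement is the Claim_ definition above) =====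
theorem csd_nonzero_digits_spec : Claim_equal_csd_nonzero_digits := by
  intro n _
  unfold Spec_csd_nonzero_digits csd_nonzero_digits csd_nonzero_digits_alt
  rw [pvMain n.natAbs n (le_refl _) 0]
  ring
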